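-- pv_equiv track=rewrite | github.com/PI314Dev/IA-Water-Sort | waterSortFunctions.py | chercher_remplissable
-- ===== SOURCE A (Python) =====
-- def remplissable(tube1, tube2):
--     couleur1 = 0
--     couleur2 = 0
--     if len(tube1) > 0:
--         couleur1 = tube1[-1]
--     if len(tube2) > 0:
--         couleur2 = tube2[-1]
--
--     return (len(tube1) < 4 and couleur1 == couleur2 and couleur1 != 0 and couleur2 != 0) or (len(tube1) == 0 and len(tube2)>0)
--
-- def chercher_remplissable(liste_tube):
--     liste = []
--     for i in range(len(liste_tube)):
--         if bloc(liste_tube[i]) < 4: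
--             for j in range(len(liste_tube)):
--                 if bloc(liste_tube[j]) < 4:
--                     if j != i:
--                         if remplissable(liste_tube[i], liste_tube[j]):
--                             liste += [i, j]
--
--     return liste
--
-- def bloc(tube):
--     l = 0
--     if len(tube) > 0:
--         l = 1
--     if len(tube) > 1 and tube[-1] == tube[-2]:
--         l = 2
--     if len(tube) > 2 and tube[-1] == tube[-2] and tube[-2] == tube[-3]:
--         l = 3
--     if len(tube) > 3 and tube[-1] == tube[-2] and tube[-2] == tube[-3] and tube[-3] == tube[0]:
--         l = 4
--     return l
-- ===== SOURCE B (Python) =====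
-- def bloc(tube):
--     l = 0
--     if len(tube) > 0:
--         l = 1
--     if len(tube) > 1 and tube[-1] == tube[-2]:
--         l = 2
--     if len(tube) > 2 and tube[-1] == tube[-2] and tube[-2] == tube[-3]:
--         l = 3
--     if len(tube) > 3 and tube[-1] == tube[-2] and tube[-2] == tube[-3] and tube[-3] == tube[0]:
--         l = 4
--     return l
--
-- def chercher_remplissable(liste_tube):
--     # Stage 1: one pass groups the valid receivers (nonempty, bloc<4) into a dict
--     # top_color -> ascending index list, plus the full ascending receiver list.
--     by_color = {}
--     receivers = []
--     for j, t in enumerate(liste_tube):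
--         if t and bloc(t) < 4:
--             receivers.append(j)
--             by_color.setdefault(t[-1], []).append(j)
--     # Stage 2: each source consults only its own colour bucket (or, when empty,
--     # the receiver list) instead of re-testing every ordered pair of tubes.
--     out = []
--     for i, t in enumerate(liste_tube):
--         if bloc(t) >= 4:
--             continue
--         if not t:
--             for j in receivers:
--                 if j != i:
--                     out += [i, j]
--         elif len(t) < 4 and t[-1] != 0:
--             for j in by_color.get(t[-1], []):
--                 if j != i:
--                     out += [i, j]
--     return out
-- ===== Notes on version B (the rewrite author's own statement) =====
-- stated objective: faster
-- what changed: B replaces A's nested all-pairs remplissable test with two staged passes: one pass groups valid receivers into a dict top_color -> ascending index list (plus a receiver list for empty sources), then each source looks up only its own colour bucket instead of scanning every tube.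
import Mathlib
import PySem

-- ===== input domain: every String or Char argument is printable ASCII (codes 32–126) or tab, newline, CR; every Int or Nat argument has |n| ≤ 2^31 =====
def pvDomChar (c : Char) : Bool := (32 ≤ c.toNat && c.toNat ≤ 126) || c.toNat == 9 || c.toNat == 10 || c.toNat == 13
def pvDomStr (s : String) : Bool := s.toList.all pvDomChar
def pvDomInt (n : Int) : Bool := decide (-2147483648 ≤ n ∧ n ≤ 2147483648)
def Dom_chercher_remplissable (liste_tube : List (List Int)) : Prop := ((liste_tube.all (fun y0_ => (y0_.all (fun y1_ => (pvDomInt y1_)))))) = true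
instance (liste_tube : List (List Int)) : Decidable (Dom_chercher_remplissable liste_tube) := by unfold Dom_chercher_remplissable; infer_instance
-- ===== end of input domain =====

-- B groups valid receivers once into a dict top_color -> index list (plus a receiver list
-- for empty sources) and each source consults only its own colour bucket, instead of A's
-- nested all-pairs `remplissable` test; objective: faster.

-- ===== PORT A =====
-- shared helper `bloc` (identical in A and Source B); indexing via pyGetD is exact: every
-- access is guarded by the same length test Python performs, so the index is in range.
def blocP (tube : List Int) : Int :=
  let l : Int := 0
  let l := if tube.length > 0 then 1 else l
  let l := if tube.length > 1 ∧ PySem.List.pyGetD tube (-1) 0 = PySem.List.pyGetD tube (-2) 0 then 2 else l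
  let l := if tube.length > 2 ∧ PySem.List.pyGetD tube (-1) 0 = PySem.List.pyGetD tube (-2) 0 ∧
              PySem.List.pyGetD tube (-2) 0 = PySem.List.pyGetD tube (-3) 0 then 3 else l
  let l := if tube.length > 3 ∧ PySem.List.pyGetD tube (-1) 0 = PySem.List.pyGetD tube (-2) 0 ∧
              PySem.List.pyGetD tube (-2) 0 = PySem.List.pyGetD tube (-3) 0 ∧
              PySem.List.pyGetD tube (-3) 0 = PySem.List.pyGetD tube 0 0 then 4 else l
  l

def remplissableP (tube1 tube2 : List Int) : Bool :=
  let couleur1 : Int := if tube1.length > 0 then PySem.List.pyGetD tube1 (-1) 0 else 0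
  let couleur2 : Int := if tube2.length > 0 then PySem.List.pyGetD tube2 (-1) 0 else 0
  decide ((tube1.length < 4 ∧ couleur1 = couleur2 ∧ couleur1 ≠ 0 ∧ couleur2 ≠ 0) ∨
          (tube1.length = 0 ∧ tube2.length > 0))

def chercher_remplissable (liste_tube : List (List Int)) : List Int :=
  (PySem.List.pyRange 0 (PySem.List.len liste_tube) 1).foldl (fun liste i =>
    if blocP (PySem.List.pyGetD liste_tube i []) < 4 then
      (PySem.List.pyRange 0 (PySem.List.len liste_tube) 1).foldl (fun liste j =>
        if blocP (PySem.List.pyGetD liste_tube j []) < 4 then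
          if j ≠ i then
            if remplissableP (PySem.List.pyGetD liste_tube i []) (PySem.List.pyGetD liste_tube j []) then
              liste ++ [i, j]
            else liste
          else liste
        else liste) liste
    else liste) []

-- ===== PORT B =====
-- stage 1: (by_color, receivers) — `setdefault(c, []).append(j)` is Dict.modify c [] (· ++ [j])
def chercher_remplissable_alt (liste_tube : List (List Int)) : List Int :=
  let st : PySem.Dict Int (List Int) × List Int :=
    (PySem.List.enumerate liste_tube 0).foldl
      (fun s p =>
        if p.2.length > 0 ∧ blocP p.2 < 4 then
          (s.1.modify (PySem.List.pyGetD p.2 (-1) 0) [] (· ++ [p.1]), s.2 ++ [p.1])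
        else s) (PySem.Dict.empty, [])
  (PySem.List.enumerate liste_tube 0).foldl (fun out p =>
    if blocP p.2 ≥ 4 then out
    else if p.2.length = 0 then
      st.2.foldl (fun out j => if j ≠ p.1 then out ++ [p.1, j] else out) out
    else if (p.2.length : Int) < 4 ∧ PySem.List.pyGetD p.2 (-1) 0 ≠ 0 then
      (st.1.getD (PySem.List.pyGetD p.2 (-1) 0) []).foldl
        (fun out j => if j ≠ p.1 then out ++ [p.1, j] else out) out
    else out) []

-- ===== PRECONDITION & SPEC =====
def Spec_chercher_remplissable (liste_tube : List (List Int)) (out : List Int) : Prop := out = chercher_remplissable_alt liste_tube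
instance (liste_tube : List (List Int)) (out : List Int) : Decidable (Spec_chercher_remplissable liste_tube out) := by unfold Spec_chercher_remplissable; infer_instance

-- ===== CLAIM (what is proved, stated in full; the proofs are below) =====
def Claim_equal_chercher_remplissable : Prop := ∀ (liste_tube : List (List Int)), Dom_chercher_remplissable liste_tube → Spec_chercher_remplissable liste_tube (chercher_remplissable liste_tube)

-- ===== LEMMAS AND PROOFS =====

-- helper (proof-only): turn a guarded append into an append of a guarded list
theorem pvIfAppend {α : Type} (P : Prop) [Decidable P] (x y : List α) :
    (if P then x ++ y else x) = x ++ (if P then y else []) := by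
  split_ifs <;> simp

-- helper (proof-only): B's three-way branch as one append
theorem pvIf3Append {α : Type} (P Q : Prop) [Decidable P] [Decidable Q]
    (x a b : List α) :
    (if P then x else if Q then x ++ a else x ++ b)
      = x ++ (if P then [] else if Q then a else b) := by
  split_ifs <;> simp

-- helper (proof-only): flatMap over a filtered list
theorem pvFlatMapFilter {α γ : Type} (l : List α) (p : α → Bool) (g : α → List γ) :
    (l.filter p).flatMap g = l.flatMap (fun x => if p x then g x else []) := by
  induction l with
  | nil => rfl
  | cons a l ih => by_cases h : p a <;> simp [h, ih]

-- the receiver-qualification test of B's first pass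
def pvQ (p : Int × List Int) : Bool := decide (p.2.length > 0 ∧ blocP p.2 < 4)

-- stage-1 fold characterised: dict = grouping fold over the keyed filtered pairs,
-- receivers = indices of the filtered pairs, appended in order
theorem pvBuild (l : List (Int × List Int)) (d : PySem.Dict Int (List Int)) (r : List Int) :
    l.foldl (fun s p =>
        if p.2.length > 0 ∧ blocP p.2 < 4 then
          (s.1.modify (PySem.List.pyGetD p.2 (-1) 0) [] (· ++ [p.1]), s.2 ++ [p.1])
        else s) (d, r)
      = ( ((l.filter pvQ).map (fun p => (PySem.List.pyGetD p.2 (-1) 0, p.1))).foldl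
            (fun d p => d.modify p.1 [] (· ++ [p.2])) d,
          r ++ (l.filter pvQ).map (·.1) ) := by
  induction l generalizing d r with
  | nil => simp
  | cons a l ih =>
    by_cases h : a.2.length > 0 ∧ blocP a.2 < 4 <;>
      simp [pvQ, h, ih, List.foldl_cons]

-- A as one flatMap over index pairs
theorem pvA_flat (lt : List (List Int)) :
    chercher_remplissable lt
      = (PySem.List.pyRange 0 (PySem.List.len lt) 1).flatMap (fun i =>
          if blocP (PySem.List.pyGetD lt i []) < 4 then
            (PySem.List.pyRange 0 (PySem.List.len lt) 1).flatMap (fun j =>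
              if blocP (PySem.List.pyGetD lt j []) < 4 then
                if j ≠ i then
                  if remplissableP (PySem.List.pyGetD lt i []) (PySem.List.pyGetD lt j []) = true
                  then [i, j] else []
                else []
              else [])
          else []) := by
  unfold chercher_remplissable
  simp only [PySem.List.foldl_append_eq_flatMap, pvIfAppend, List.nil_append]

-- B as one flatMap over index pairs
theorem pvB_flat (lt : List (List Int)) :
    chercher_remplissable_alt lt
      = (PySem.List.pyRange 0 (PySem.List.len lt) 1).flatMap (fun i =>
          if blocP (PySem.List.pyGetD lt i []) ≥ 4 then []
          else if (PySem.List.pyGetD lt i []).length = 0 then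
            (PySem.List.pyRange 0 (PySem.List.len lt) 1).flatMap (fun j =>
              if pvQ (j, PySem.List.pyGetD lt j []) then
                (if j ≠ i then [i, j] else []) else [])
          else if ((PySem.List.pyGetD lt i []).length : Int) < 4 ∧
                  PySem.List.pyGetD (PySem.List.pyGetD lt i []) (-1) 0 ≠ 0 then
            (PySem.List.pyRange 0 (PySem.List.len lt) 1).flatMap (fun j =>
              if pvQ (j, PySem.List.pyGetD lt j []) ∧
                 PySem.List.pyGetD (PySem.List.pyGetD lt j []) (-1) 0
                   = PySem.List.pyGetD (PySem.List.pyGetD lt i []) (-1) 0 then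
                (if j ≠ i then [i, j] else []) else [])
          else []) := by
  unfold chercher_remplissable_alt
  rw [PySem.List.enumerate_eq_map_pyRange lt ([] : List Int), List.foldl_map, pvBuild]
  simp only [PySem.Dict.getD_foldl_modify_append, PySem.Dict.getD_empty, List.nil_append]
  simp only [pvIfAppend, PySem.List.foldl_append_eq_flatMap, pvIf3Append]
  refine List.flatMap_congr (fun i _ => ?_)
  congr 1
  congr 1
  · -- empty-source branch: flatMap over the receiver list
    rw [List.flatMap_map, pvFlatMapFilter, List.flatMap_map]
  · congr 1
    -- colour bucket: double filter merged into one conjunction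
    simp only [List.map_map, List.filter_map, List.flatMap_map, List.filter_filter]
    rw [pvFlatMapFilter]
    refine List.flatMap_congr (fun j _ => ?_)
    simp only [Function.comp_def]
    simp [pvQ, Bool.and_eq_true, beq_iff_eq, and_comm]

-- the per-source-tube bodies of the two flat forms agree
theorem pvBody_eq (lt : List (List Int)) (i : Int) :
    (if blocP (PySem.List.pyGetD lt i []) < 4 then
        (PySem.List.pyRange 0 (PySem.List.len lt) 1).flatMap (fun j =>
          if blocP (PySem.List.pyGetD lt j []) < 4 then
            if j ≠ i then
              if remplissableP (PySem.List.pyGetD lt i []) (PySem.List.pyGetD lt j []) = true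
              then [i, j] else []
            else []
          else [])
      else [])
    = (if blocP (PySem.List.pyGetD lt i []) ≥ 4 then []
       else if (PySem.List.pyGetD lt i []).length = 0 then
         (PySem.List.pyRange 0 (PySem.List.len lt) 1).flatMap (fun j =>
           if pvQ (j, PySem.List.pyGetD lt j []) then
             (if j ≠ i then [i, j] else []) else [])
       else if ((PySem.List.pyGetD lt i []).length : Int) < 4 ∧
               PySem.List.pyGetD (PySem.List.pyGetD lt i []) (-1) 0 ≠ 0 then
         (PySem.List.pyRange 0 (PySem.List.len lt) 1).flatMap (fun j =>
           if pvQ (j, PySem.List.pyGetD lt j []) ∧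
              PySem.List.pyGetD (PySem.List.pyGetD lt j []) (-1) 0
                = PySem.List.pyGetD (PySem.List.pyGetD lt i []) (-1) 0 then
             (if j ≠ i then [i, j] else []) else [])
       else []) := by
  set t := PySem.List.pyGetD lt i [] with ht
  by_cases h4 : blocP t < 4
  case neg => rw [if_neg h4, if_pos (by omega : blocP t ≥ 4)]
  rw [if_pos h4, if_neg (by omega : ¬ blocP t ≥ 4)]
  by_cases h0 : t.length = 0
  · rw [if_pos h0]
    refine List.flatMap_congr (fun j _ => ?_)
    set u := PySem.List.pyGetD lt j []
    simp only [remplissableP, h0, pvQ, decide_eq_true_eq]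
    split_ifs <;> simp_all
  · rw [if_neg h0]
    by_cases hc : ((t.length : Int) < 4 ∧ PySem.List.pyGetD t (-1) 0 ≠ 0)
    · rw [if_pos hc]
      refine List.flatMap_congr (fun j _ => ?_)
      set u := PySem.List.pyGetD lt j []
      have hlt : 0 < t.length := Nat.pos_of_ne_zero h0
      have ht4 : t.length < 4 := by exact_mod_cast hc.1
      have hu : PySem.List.pyGetD u (-1) 0 = PySem.List.pyGetD t (-1) 0 ∧ 0 < u.length →
          (if u.length > 0 then PySem.List.pyGetD u (-1) 0 else 0) = PySem.List.pyGetD t (-1) 0 := by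
        intro ⟨he, hl⟩; rw [if_pos hl]; exact he
      simp only [remplissableP, pvQ, decide_eq_true_eq, if_pos hlt]
      split_ifs <;> simp_all
    · rw [if_neg hc]
      refine List.flatMap_eq_nil_iff.mpr (fun j _ => ?_)
      set u := PySem.List.pyGetD lt j []
      have hr : remplissableP t u = false := by
        simp only [remplissableP, decide_eq_false_iff_not]
        rintro (⟨hl, he, hnz, _⟩ | ⟨hz, _⟩)
        · rw [if_pos (Nat.pos_of_ne_zero h0)] at hnz
          exact hc ⟨by exact_mod_cast hl, hnz⟩
        · exact h0 hz
      split_ifs <;> simp_all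

-- ===== VERDICT (by name: the statement is the Claim_ definition above) =====
theorem chercher_remplissable_spec : Claim_equal_chercher_remplissable := by
  intro lt _
  unfold Spec_chercher_remplissable
  rw [pvA_flat, pvB_flat]
  exact List.flatMap_congr (fun i _ => pvBody_eq lt i)
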